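-- pv_equiv track=rewrite | github.com/ADS2025-A2/team-A2-recsys | src/app/Home.py | fix_title
-- ===== SOURCE A (Python) =====
-- def fix_title(title):
--     articles = ["The", "A", "An"]
--     for article in articles:
--         suffix = f", {article}"
--         if title.endswith(suffix):
--             title = f"{article} {title[:-len(suffix)]}"
--             break
--     return title
-- ===== SOURCE B (Python) =====
-- def fix_title(title):
--     # Build a trie over the REVERSED suffixes ", The" / ", A" / ", An";
--     # a single backward character scan through the trie finds the (unique)
--     # matching suffix and the article stored at its leaf.
--     trie = {}
--     for art in ("The", "A", "An"):
--         node = trie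
--         for ch in (", " + art)[::-1]:
--             node = node.setdefault(ch, {})
--         node["$"] = art
--     node = trie
--     depth = 0
--     for ch in title[::-1]:
--         if ch not in node:
--             return title
--         node = node[ch]
--         depth += 1
--         if "$" in node:
--             art = node["$"]
--             return art + " " + title[:len(title) - depth]
--     return title
-- ===== Notes on version B (the rewrite author's own statement) =====
-- stated objective: alternative
-- what changed: Replaces the loop of per-article endswith tests with a trie built over the reversed suffixes and a single backward character scan through that trie, which yields the matched article and split depth in one pass.
import Mathlib
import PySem

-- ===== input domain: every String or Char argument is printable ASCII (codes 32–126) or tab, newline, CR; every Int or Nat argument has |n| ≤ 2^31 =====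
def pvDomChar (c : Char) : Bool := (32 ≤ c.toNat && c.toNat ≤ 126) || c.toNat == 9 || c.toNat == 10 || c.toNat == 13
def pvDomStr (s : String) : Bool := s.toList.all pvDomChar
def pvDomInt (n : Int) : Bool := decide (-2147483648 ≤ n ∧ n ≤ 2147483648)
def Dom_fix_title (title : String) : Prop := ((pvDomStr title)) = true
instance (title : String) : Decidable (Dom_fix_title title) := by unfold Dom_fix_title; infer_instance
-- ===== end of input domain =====

-- B replaces A's loop of per-article endswith tests by a trie over the reversed suffixes and
-- one backward character scan through that trie (objective: alternative; no speed claim).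
-- Both ports work on the code-point list (title.toList), as PySem prescribes for strings.

-- ===== PORT A =====
-- the loop 'for article in articles: ... break' as structural recursion over the article list;
-- suffix = f", {article}", and on a match f"{article} {title[:-len(suffix)]}" is returned (break)
def fixA : List (List Char) → List Char → List Char
  | [], t => t
  | a :: rest, t =>
    let suffix := ',' :: ' ' :: a
    if PySem.Chars.endswith t suffix then
      a ++ ' ' :: PySem.Chars.slice t none (some (-(PySem.Chars.len suffix : Int)))
    else fixA rest t

def fix_title (title : String) : String :=
  String.ofList (fixA [['T','h','e'], ['A'], ['A','n']] title.toList)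

-- ===== PORT B =====
-- Source B's trie of nested dicts: a node carries the optional terminal value (node["$"]) and its
-- child list (mutual pair instead of a nested inductive, as required); keys in insertion order.
mutual
inductive BTrie : Type
  | node : Option (List Char) → BKids → BTrie
  deriving DecidableEq
inductive BKids : Type
  | nil : BKids
  | kcons : Char → BTrie → BKids → BKids
  deriving DecidableEq
end

-- 'ch in node' / 'node[ch]' : first-match lookup in the child list
def kidsGet : BKids → Char → Option BTrie
  | BKids.nil, _ => none
  | BKids.kcons d t rest, c => if d = c then some t else kidsGet rest c

-- the building loop 'for ch in (", "+art)[::-1]: node = node.setdefault(ch, {})' then 'node["$"]=art'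
mutual
def insertPath : BTrie → List Char → List Char → BTrie
  | BTrie.node _ k, [], art => BTrie.node (some art) k
  | BTrie.node t k, c :: cs, art => BTrie.node t (insertKids k c cs art)
def insertKids : BKids → Char → List Char → List Char → BKids
  | BKids.nil, c, cs, art => BKids.kcons c (insertPath (BTrie.node none BKids.nil) cs art) BKids.nil
  | BKids.kcons d ch rest, c, cs, art =>
    if d = c then BKids.kcons d (insertPath ch cs art) rest
    else BKids.kcons d ch (insertKids rest c cs art)
end

-- 'trie = {}; for art in ("The","A","An"): ...' — the trie is built once from the three articles
def bTrie : BTrie :=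
  [['T','h','e'], ['A'], ['A','n']].foldl
    (fun tr art => insertPath tr ((',' :: ' ' :: art).reverse) art)
    (BTrie.node none BKids.nil)

-- the scanning loop over title[::-1] with the depth counter; returns (article, depth) on a match
def walkB : BTrie → List Char → Nat → Option (List Char × Nat)
  | _, [], _ => none
  | BTrie.node _ kids, ch :: rest, depth =>
    match kidsGet kids ch with
    | none => none
    | some child =>
      match child with
      | BTrie.node (some art) _ => some (art, depth + 1)
      | BTrie.node none _ => walkB child rest (depth + 1)

def fix_title_alt (title : String) : String :=
  let t := title.toList
  match walkB bTrie t.reverse 0 with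
  | some (art, depth) =>
      String.ofList (art ++ ' ' :: PySem.Chars.slice t none (some ((t.length : Int) - depth)))
  | none => title

-- ===== PRECONDITION & SPEC =====
def Spec_fix_title (title : String) (out : String) : Prop := out = fix_title_alt title
instance (title : String) (out : String) : Decidable (Spec_fix_title title out) := by unfold Spec_fix_title; infer_instance

-- ===== CLAIM (what is proved, stated in full; the proofs are below) =====
def Claim_equal_fix_title : Prop := ∀ (title : String), Dom_fix_title title → Spec_fix_title title (fix_title title)

-- ===== LEMMAS AND PROOFS =====

-- endswith in terms of the reversed string: s ends with pat iff the reversed s starts with pat.reverse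
theorem ends_rev (s pat : List Char) :
    PySem.Chars.endswith s pat = true ↔ s.reverse.take pat.length = pat.reverse := by
  rw [PySem.Chars.endswith_iff]
  constructor
  · rintro ⟨q, rfl⟩
    rw [List.reverse_append]
    exact List.take_left' (by simp)
  · intro h
    refine ⟨(s.reverse.drop pat.length).reverse, ?_⟩
    have : s.reverse = pat.reverse ++ s.reverse.drop pat.length := by
      conv_lhs => rw [← List.take_append_drop pat.length s.reverse, h]
    have h2 := congrArg List.reverse this
    simpa using h2.symm

-- the concrete walk over the concrete trie, characterised by the first ≤ 5 reversed characters
theorem bTrie_eq : bTrie =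
    BTrie.node none
      (BKids.kcons 'e'
        (BTrie.node none (BKids.kcons 'h'
          (BTrie.node none (BKids.kcons 'T'
            (BTrie.node none (BKids.kcons ' '
              (BTrie.node none (BKids.kcons ',' (BTrie.node (some ['T','h','e']) BKids.nil) BKids.nil))
              BKids.nil))
            BKids.nil))
          BKids.nil))
        (BKids.kcons 'A'
          (BTrie.node none (BKids.kcons ' '
            (BTrie.node none (BKids.kcons ',' (BTrie.node (some ['A']) BKids.nil) BKids.nil))
            BKids.nil))
          (BKids.kcons 'n'
            (BTrie.node none (BKids.kcons 'A'
              (BTrie.node none (BKids.kcons ' '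
                (BTrie.node none (BKids.kcons ',' (BTrie.node (some ['A','n']) BKids.nil) BKids.nil))
                BKids.nil))
              BKids.nil))
            BKids.nil))) := by simp [bTrie, insertPath, insertKids]

-- the concrete walk over the concrete trie, characterised by the first ≤ 5 reversed characters
theorem walkB_spec (r : List Char) :
    walkB bTrie r 0 =
      if r.take 5 = ['e','h','T',' ',','] then some (['T','h','e'], 5)
      else if r.take 3 = ['A',' ',','] then some (['A'], 3)
      else if r.take 4 = ['n','A',' ',','] then some (['A','n'], 4)
      else none := by
  rcases r with _ | ⟨c1, r⟩
  · decide
  rcases r with _ | ⟨c2, r⟩ <;> [skip; rcases r with _ | ⟨c3, r⟩] <;>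
    [skip; skip; rcases r with _ | ⟨c4, r⟩] <;> [skip; skip; skip; rcases r with _ | ⟨c5, r⟩] <;>
  · simp only [bTrie_eq, walkB, kidsGet, List.take]
    split_ifs <;> (try simp_all [walkB, kidsGet]) <;> (try split_ifs) <;>
      (try simp_all [walkB, kidsGet]) <;> (try split_ifs) <;>
      (try simp_all [walkB, kidsGet]) <;> (try split_ifs) <;>
      (try simp_all [walkB, kidsGet]) <;> (try subst_vars) <;> (try simp_all [eq_comm])

-- B's slice title[:len(title)-depth] is a take when depth ≤ len
theorem slice_b (s : List Char) (d : Nat) (hd : d ≤ s.length) :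
    PySem.Chars.slice s none (some ((s.length : Int) - (d : Int))) = s.take (s.length - d) := by
  rw [PySem.Chars.slice_eq_listSlice, PySem.List.slice_to s (by omega)]
  congr 1
  omega

theorem ends_of_take (s w : List Char) (h : s.reverse.take (w.length + 2) = w.reverse ++ [' ', ',']) :
    ∃ q, s = q ++ ',' :: ' ' :: w := by
  have := (ends_rev s (',' :: ' ' :: w)).mpr (by simpa using h)
  rw [PySem.Chars.endswith_iff] at this
  obtain ⟨q, hq⟩ := this
  exact ⟨q, hq.symm⟩

theorem main_eq (s : List Char) :
    fixA [['T','h','e'], ['A'], ['A','n']] s =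
      (match walkB bTrie s.reverse 0 with
       | some (art, depth) => art ++ ' ' :: PySem.Chars.slice s none (some ((s.length : Int) - (depth : Int)))
       | none => s) := by
  rw [walkB_spec]
  by_cases hThe : s.reverse.take 5 = ['e','h','T',' ',',']
  · obtain ⟨q, rfl⟩ := ends_of_take s ['T','h','e'] (by simpa using hThe)
    have he : PySem.Chars.endswith (q ++ ',' :: ' ' :: ['T','h','e']) (',' :: ' ' :: ['T','h','e']) = true := by
      rw [PySem.Chars.endswith_iff]; exact ⟨q, rfl⟩
    have hlen : 5 ≤ (q ++ ',' :: ' ' :: ['T','h','e']).length := by simp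
    simp only [fixA, he, hThe, if_pos]
    rw [slice_b _ 5 hlen, PySem.Chars.slice_eq_listSlice,
        show (-(PySem.Chars.len [',',' ','T','h','e'] : Int)) = -((5:Nat):Int) from by decide,
        PySem.List.slice_to_neg_natCast _ 5 (by omega)]
  · rw [if_neg hThe]
    have hnThe : PySem.Chars.endswith s [',',' ','T','h','e'] = false := by
      rw [Bool.eq_false_iff]
      intro hc
      exact hThe (by simpa using (ends_rev s [',',' ','T','h','e']).mp hc)
    by_cases hA : s.reverse.take 3 = ['A',' ',',']
    · obtain ⟨q, rfl⟩ := ends_of_take s ['A'] (by simpa using hA)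
      have he : PySem.Chars.endswith (q ++ ',' :: ' ' :: ['A']) (',' :: ' ' :: ['A']) = true := by
        rw [PySem.Chars.endswith_iff]; exact ⟨q, rfl⟩
      have hlen : 3 ≤ (q ++ ',' :: ' ' :: ['A']).length := by simp
      simp only [fixA, hnThe, Bool.false_eq_true, if_false, he, hA, if_pos]
      rw [slice_b _ 3 hlen, PySem.Chars.slice_eq_listSlice,
          show (-(PySem.Chars.len [',',' ','A'] : Int)) = -((3:Nat):Int) from by decide,
          PySem.List.slice_to_neg_natCast _ 3 (by omega)]
    · rw [if_neg hA]
      have hnA : PySem.Chars.endswith s [',',' ','A'] = false := by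
        rw [Bool.eq_false_iff]
        intro hc
        exact hA (by simpa using (ends_rev s [',',' ','A']).mp hc)
      by_cases hAn : s.reverse.take 4 = ['n','A',' ',',']
      · obtain ⟨q, rfl⟩ := ends_of_take s ['A','n'] (by simpa using hAn)
        have he : PySem.Chars.endswith (q ++ ',' :: ' ' :: ['A','n']) (',' :: ' ' :: ['A','n']) = true := by
          rw [PySem.Chars.endswith_iff]; exact ⟨q, rfl⟩
        have hlen : 4 ≤ (q ++ ',' :: ' ' :: ['A','n']).length := by simp
        simp only [fixA, hnThe, hnA, Bool.false_eq_true, if_false, he, hAn, if_pos]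
        rw [slice_b _ 4 hlen, PySem.Chars.slice_eq_listSlice,
            show (-(PySem.Chars.len [',',' ','A','n'] : Int)) = -((4:Nat):Int) from by decide,
            PySem.List.slice_to_neg_natCast _ 4 (by omega)]
      · rw [if_neg hAn]
        have hnAn : PySem.Chars.endswith s [',',' ','A','n'] = false := by
          rw [Bool.eq_false_iff]
          intro hc
          exact hAn (by simpa using (ends_rev s [',',' ','A','n']).mp hc)
        simp [fixA, hnThe, hnA, hnAn]

-- ===== VERDICT (by name: the statement is the Claim_ definition above) =====
theorem fix_title_spec : Claim_equal_fix_title := by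
  intro title _
  unfold Spec_fix_title fix_title fix_title_alt
  rw [main_eq title.toList]
  cases h : walkB bTrie title.toList.reverse 0 with
  | none => simp [h]
  | some p =>
    obtain ⟨art, d⟩ := p
    simp [h]
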